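-- pv_equiv track=rewrite | github.com/timlee-bioinf/gene_mapping_project | meiosis_simu.py | fertilization
-- ===== SOURCE A (Python) =====
-- def fertilization(gamete1, gamete2):
--     alleles1 = gamete1.split(",")
--     alleles2 = gamete2.split(",")
--
--     allele_dict = {}
--
--     for a in alleles1 + alleles2:
--         base = a.lower()
--         if base not in allele_dict:
--             allele_dict[base] = []
--         allele_dict[base].append(a)
--
--     child_genotype = []
--     for base in sorted(allele_dict.keys()):
--         pair = allele_dict[base]
--         if len(pair) == 1:
--             pair.append(pair[0])
--         sorted_pair = sorted(pair, key=lambda x: (x.islower(), x))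
--         child_genotype.append("".join(sorted_pair))
--
--     return "/".join(child_genotype)
-- ===== SOURCE B (Python) =====
-- def fertilization(gamete1, gamete2):
--     alleles = gamete1.split(",") + gamete2.split(",")
--     parts = []
--     for base in sorted({a.lower() for a in alleles}):
--         group = sorted((a for a in alleles if a.lower() == base),
--                        key=lambda x: (x.islower(), x))
--         if len(group) == 1:
--             group = group + group
--         parts.append("".join(group))
--     return "/".join(parts)
-- ===== Notes on version B (the rewrite author's own statement) =====
-- stated objective: alternative
-- what changed: B drops A's dict-grouping pass entirely: it sorts the set of lowered bases and selects each base's alleles by a filter scan over the combined list, sorting the group before (not after) duplicating singletons.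
import Mathlib
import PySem

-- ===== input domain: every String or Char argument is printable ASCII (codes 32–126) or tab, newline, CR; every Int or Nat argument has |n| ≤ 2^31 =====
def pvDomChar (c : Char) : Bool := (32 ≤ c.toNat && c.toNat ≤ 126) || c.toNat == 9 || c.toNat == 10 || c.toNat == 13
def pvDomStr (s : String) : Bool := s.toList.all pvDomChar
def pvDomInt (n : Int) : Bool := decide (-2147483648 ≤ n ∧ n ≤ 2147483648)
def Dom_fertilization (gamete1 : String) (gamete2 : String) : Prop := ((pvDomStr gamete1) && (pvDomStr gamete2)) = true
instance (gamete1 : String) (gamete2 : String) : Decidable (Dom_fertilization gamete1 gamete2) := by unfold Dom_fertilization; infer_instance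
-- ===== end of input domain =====

-- B replaces A's dict-grouping pass with a sorted set of lowered bases plus a
-- per-base filter scan (no dict), duplicating singletons after the sort instead
-- of before; objective: alternative (not claimed faster).

-- shared helpers: both Pythons call s.split(","), s.lower() and the key lambda (x.islower(), x)
-- s.split(",") : "," is a nonempty literal, so Str.split? never returns none; .getD [] is unreachable
def pySplitComma (s : String) : List String := (PySem.Str.split? s ",").getD []

-- s.islower() for a string, exact on ASCII: at least one cased char and no uppercase char
def pyStrIslower (s : String) : Bool :=
  s.toList.any PySem.Chars.islower && !s.toList.any PySem.Chars.isupper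

-- the Python sort key lambda x: (x.islower(), x); tuple comparison is lexicographic
def pyKey (x : String) : Lex (Bool × String) := toLex (pyStrIslower x, x)

-- ===== PORT A =====
-- the 'if base not in dict: dict[base]=[]' + append pattern is Dict.modify with default []
def fertilization (gamete1 : String) (gamete2 : String) : String :=
  let alleles1 := pySplitComma gamete1
  let alleles2 := pySplitComma gamete2
  let allele_dict := (alleles1 ++ alleles2).foldl
    (fun d a => d.modify (PySem.Str.lower a) [] (fun v => v ++ [a])) PySem.Dict.empty
  let child_genotype := (PySem.List.sorted allele_dict.keys id).map (fun base =>
    let pair := allele_dict.getD base []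
    -- pair.append(pair[0]) under len(pair) == 1; pair[0] exists there (headD default unreachable)
    let pair := if pair.length == 1 then pair ++ [pair.headD ""] else pair
    PySem.Str.join "" (PySem.List.sorted pair pyKey))
  PySem.Str.join "/" child_genotype

-- ===== PORT B =====
def fertilization_alt (gamete1 : String) (gamete2 : String) : String :=
  let alleles := pySplitComma gamete1 ++ pySplitComma gamete2
  let parts := (PySem.List.sorted (PySem.Set.ofList (alleles.map PySem.Str.lower)) id).map
    (fun base =>
      let group := PySem.List.sorted (alleles.filter (fun a => PySem.Str.lower a == base)) pyKey
      let group := if group.length == 1 then group ++ group else group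
      PySem.Str.join "" group)
  PySem.Str.join "/" parts

-- ===== PRECONDITION & SPEC =====
def Spec_fertilization (gamete1 : String) (gamete2 : String) (out : String) : Prop := out = fertilization_alt gamete1 gamete2
instance (gamete1 : String) (gamete2 : String) (out : String) : Decidable (Spec_fertilization gamete1 gamete2 out) := by unfold Spec_fertilization; infer_instance

-- ===== CLAIM (what is proved, stated in full; the proofs are below) =====
def Claim_equal_fertilization : Prop := ∀ (gamete1 : String) (gamete2 : String), Dom_fertilization gamete1 gamete2 → Spec_fertilization gamete1 gamete2 (fertilization gamete1 gamete2)

-- ===== LEMMAS AND PROOFS =====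

-- A's dict lookup at a base is B's filter of the allele list
lemma getD_allele_dict (alleles : List String) (base : String) :
    ((alleles.foldl (fun d a => d.modify (PySem.Str.lower a) [] (fun v => v ++ [a]))
        (PySem.Dict.empty : PySem.Dict String (List String))).getD base [])
      = alleles.filter (fun a => PySem.Str.lower a == base) := by
  have h : alleles.foldl (fun d a => d.modify (PySem.Str.lower a) [] (fun v => v ++ [a]))
        (PySem.Dict.empty : PySem.Dict String (List String))
      = (alleles.map (fun a => (PySem.Str.lower a, a))).foldl
        (fun d p => d.modify p.1 [] (fun v => v ++ [p.2])) PySem.Dict.empty := by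
    rw [List.foldl_map]
  rw [h, PySem.Dict.getD_foldl_modify_append, List.filter_map]
  simp [Function.comp_def]

-- A's dict keys are the distinct lowered alleles in first-occurrence order
lemma keys_allele_dict (alleles : List String) :
    (alleles.foldl (fun d a => d.modify (PySem.Str.lower a) [] (fun v => v ++ [a]))
        (PySem.Dict.empty : PySem.Dict String (List String))).keys
      = PySem.Set.ofList (alleles.map PySem.Str.lower) := by
  rw [PySem.Dict.keys_foldl_modify_key alleles PySem.Str.lower [] (fun _ a v => v ++ [a])]
  rfl

-- per-base: duplicate-then-sort (A) equals sort-then-duplicate (B)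
lemma per_base_eq (g : List String) :
    PySem.Str.join "" (PySem.List.sorted
        (if g.length == 1 then g ++ [g.headD ""] else g) pyKey)
      = PySem.Str.join ""
        (let s := PySem.List.sorted g pyKey
         if s.length == 1 then s ++ s else s) := by
  rcases g with _ | ⟨x, _ | ⟨y, t⟩⟩
  · simp [PySem.List.sorted]
  · -- singleton: sorted [x,x] = [x,x] and sorted [x] = [x]
    simp [PySem.List.sorted, PySem.List.insertBy]
  · -- length ≥ 2: neither side duplicates
    have hl : (PySem.List.sorted (x :: y :: t) pyKey).length = (x :: y :: t).length :=
      PySem.List.length_sorted _ _ _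
    simp only []
    rw [if_neg (by simp), if_neg (by simp [hl])]

-- ===== VERDICT (by name: the statement is the Claim_ definition above) =====
theorem fertilization_spec : Claim_equal_fertilization := by
  intro g1 g2 _
  show fertilization g1 g2 = fertilization_alt g1 g2
  show PySem.Str.join "/" _ = PySem.Str.join "/" _
  rw [keys_allele_dict]
  refine congrArg (PySem.Str.join "/") ?_
  refine List.map_congr_left (fun base _ => ?_)
  simp only [getD_allele_dict]
  exact per_base_eq _
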